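-- pv_equiv track=rewrite | github.com/James-HoneyBadger/Time_Warp_II | core/languages/templecode.py | _split_top_level_line
-- ===== SOURCE A (Python) =====
-- def _split_top_level_line(line):
--     """Split a single line into separate commands, respecting brackets."""
--     if not line:
--         return []
--
--     # If line contains REPEAT with brackets, keep as one unit
--     # Otherwise split by recognizing command keywords
--     commands = []
--     tokens = []
--     depth = 0
--     i = 0
--     while i < len(line):
--         ch = line[i]
--         if ch == '[':
--             depth += 1
--             tokens.append(ch)
--         elif ch == ']':
--             depth -= 1
--             tokens.append(ch)
--             # After closing bracket at depth 0, make a command break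
--             if depth == 0:
--                 commands.append(''.join(tokens).strip())
--                 tokens = []
--         elif ch == ' ' and depth == 0:
--             # Check if next word is a command keyword
--             rest = line[i + 1:].lstrip()
--             first_next = rest.split()[0].upper() if rest.split() else ""
--             all_keywords = {
--                 "FORWARD", "FD", "BACK", "BK", "BACKWARD",
--                 "LEFT", "LT", "RIGHT", "RT",
--                 "PENUP", "PU", "PENDOWN", "PD",
--                 "HOME", "CLEARSCREEN", "CS",
--                 "SHOWTURTLE", "ST", "HIDETURTLE", "HT",
--                 "SETXY", "SETCOLOR", "SETCOLOUR", "SETPENCOLOR", "SETPC",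
--                 "SETPENSIZE", "SETWIDTH", "SETHEADING", "SETH",
--                 "SETFILLCOLOR", "SETFC", "SETBACKGROUND", "SETBG",
--                 "CIRCLE", "ARC", "DOT", "RECT", "RECTANGLE",
--                 "SQUARE", "TRIANGLE", "FILL", "FILLED",
--                 "REPEAT", "MAKE", "TOWARDS",
--                 "PRINT", "LET", "IF", "FOR", "GOTO", "GOSUB", "REM", "END",
--             }
--             if first_next in all_keywords and tokens:
--                 commands.append(''.join(tokens).strip())
--                 tokens = []
--             else:
--                 tokens.append(ch)
--         else:
--             tokens.append(ch)
--         i += 1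
--
--     if tokens:
--         commands.append(''.join(tokens).strip())
--     return [c for c in commands if c]
-- ===== SOURCE B (Python) =====
-- KEYWORDS = {
--     "FORWARD", "FD", "BACK", "BK", "BACKWARD",
--     "LEFT", "LT", "RIGHT", "RT",
--     "PENUP", "PU", "PENDOWN", "PD",
--     "HOME", "CLEARSCREEN", "CS",
--     "SHOWTURTLE", "ST", "HIDETURTLE", "HT",
--     "SETXY", "SETCOLOR", "SETCOLOUR", "SETPENCOLOR", "SETPC",
--     "SETPENSIZE", "SETWIDTH", "SETHEADING", "SETH",
--     "SETFILLCOLOR", "SETFC", "SETBACKGROUND", "SETBG",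
--     "CIRCLE", "ARC", "DOT", "RECT", "RECTANGLE",
--     "SQUARE", "TRIANGLE", "FILL", "FILLED",
--     "REPEAT", "MAKE", "TOWARDS",
--     "PRINT", "LET", "IF", "FOR", "GOTO", "GOSUB", "REM", "END",
-- }
--
--
-- def _next_word_is_keyword(rest):
--     words = rest.lstrip().split()
--     return bool(words) and words[0].upper() in KEYWORDS
--
--
-- def _split_top_level_line(line):
--     """Split a line into commands: one pass collecting cut indices, then slice."""
--     # Pass 1: collect (start, end) index pairs of the segments.
--     segs = []
--     depth = 0
--     start = 0
--     for i, ch in enumerate(line):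
--         if ch == '[':
--             depth += 1
--         elif ch == ']':
--             depth -= 1
--             if depth == 0:
--                 segs.append((start, i + 1))
--                 start = i + 1
--         elif ch == ' ' and depth == 0 and start < i and _next_word_is_keyword(line[i + 1:]):
--             segs.append((start, i))
--             start = i + 1
--     segs.append((start, len(line)))
--     # Pass 2: slice, strip, drop empties.
--     return [s for s in (line[a:b].strip() for a, b in segs) if s]
-- ===== Notes on version B (the rewrite author's own statement) =====
-- stated objective: alternative
-- what changed: Replaces A's running token-buffer accumulation with a two-pass design: one scan that only tracks bracket depth and collects (start,end) cut indices, then a second pass that slices the original line at those indices, strips and drops empties.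
import Mathlib
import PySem

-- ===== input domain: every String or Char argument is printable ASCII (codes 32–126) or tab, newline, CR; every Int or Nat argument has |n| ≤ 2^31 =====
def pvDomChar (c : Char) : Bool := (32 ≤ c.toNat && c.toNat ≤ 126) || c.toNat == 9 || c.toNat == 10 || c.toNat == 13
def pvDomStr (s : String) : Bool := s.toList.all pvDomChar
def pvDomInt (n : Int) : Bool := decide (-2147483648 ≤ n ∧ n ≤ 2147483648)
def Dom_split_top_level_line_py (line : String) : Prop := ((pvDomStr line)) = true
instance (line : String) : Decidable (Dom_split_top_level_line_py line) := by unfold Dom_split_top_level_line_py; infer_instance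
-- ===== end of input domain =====

-- B replaces A's running token buffer by a two-pass design (collect cut indices, then
-- slice/strip/filter the original line); same return value, objective: alternative decomposition.

-- ===== PORT A =====
-- the keyword set (shared literal; both Pythons test membership in the same set of words)
def pvAllKeywords : List (List Char) :=
  ["FORWARD".toList, "FD".toList, "BACK".toList, "BK".toList, "BACKWARD".toList,
   "LEFT".toList, "LT".toList, "RIGHT".toList, "RT".toList,
   "PENUP".toList, "PU".toList, "PENDOWN".toList, "PD".toList,
   "HOME".toList, "CLEARSCREEN".toList, "CS".toList,
   "SHOWTURTLE".toList, "ST".toList, "HIDETURTLE".toList, "HT".toList,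
   "SETXY".toList, "SETCOLOR".toList, "SETCOLOUR".toList, "SETPENCOLOR".toList, "SETPC".toList,
   "SETPENSIZE".toList, "SETWIDTH".toList, "SETHEADING".toList, "SETH".toList,
   "SETFILLCOLOR".toList, "SETFC".toList, "SETBACKGROUND".toList, "SETBG".toList,
   "CIRCLE".toList, "ARC".toList, "DOT".toList, "RECT".toList, "RECTANGLE".toList,
   "SQUARE".toList, "TRIANGLE".toList, "FILL".toList, "FILLED".toList,
   "REPEAT".toList, "MAKE".toList, "TOWARDS".toList,
   "PRINT".toList, "LET".toList, "IF".toList, "FOR".toList, "GOTO".toList, "GOSUB".toList,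
   "REM".toList, "END".toList]

-- rest.lstrip().split()[0].upper() if … else "" — the lookahead word after the space (shared helper)
def pvFirstNext (rest : List Char) : List Char :=
  match PySem.Chars.split₀ (PySem.Chars.lstrip rest) with
  | [] => []
  | w :: _ => PySem.Chars.upper w

-- A's while-loop: state (commands, tokens, depth); recursion over the remaining suffix of the line
def pvALoop : List Char → List (List Char) → List Char → Int → List (List Char)
  | [], commands, tokens, _ =>
      if tokens ≠ [] then commands ++ [PySem.Chars.strip tokens] else commands
  | c :: rest, commands, tokens, depth =>
      if c = '[' then pvALoop rest commands (tokens ++ [c]) (depth + 1)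
      else if c = ']' then
        if depth - 1 = 0 then pvALoop rest (commands ++ [PySem.Chars.strip (tokens ++ [c])]) [] (depth - 1)
        else pvALoop rest commands (tokens ++ [c]) (depth - 1)
      else if c = ' ' ∧ depth = 0 then
        if pvFirstNext rest ∈ pvAllKeywords ∧ tokens ≠ [] then
          pvALoop rest (commands ++ [PySem.Chars.strip tokens]) [] depth
        else pvALoop rest commands (tokens ++ [c]) depth
      else pvALoop rest commands (tokens ++ [c]) depth

def split_top_level_line_py (line : String) : List String :=
  if line = "" then []
  else ((pvALoop line.toList [] [] 0).filter (· ≠ [])).map (fun cs => String.mk cs)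

-- ===== PORT B =====
-- B's pass 1: collect (start, end) cut pairs; state (i, depth, start), recursion over the suffix
def pvBCuts : List Char → Nat → Int → Nat → List (Nat × Nat)
  | [], i, _, start => [(start, i)]
  | c :: rest, i, depth, start =>
      if c = '[' then pvBCuts rest (i + 1) (depth + 1) start
      else if c = ']' then
        if depth - 1 = 0 then (start, i + 1) :: pvBCuts rest (i + 1) (depth - 1) (i + 1)
        else pvBCuts rest (i + 1) (depth - 1) start
      else if c = ' ' ∧ depth = 0 ∧ start < i ∧ pvFirstNext rest ∈ pvAllKeywords then
        (start, i) :: pvBCuts rest (i + 1) depth (i + 1)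
      else pvBCuts rest (i + 1) depth start

-- B's pass 2: line[a:b].strip() for each pair, keep the non-empty ones
def split_top_level_line_py_alt (line : String) : List String :=
  let L := line.toList
  (((pvBCuts L 0 0 0).map
      (fun p => PySem.Chars.strip ((L.drop p.1).take (p.2 - p.1)))).filter (· ≠ [])).map
    (fun cs => String.mk cs)

-- ===== PRECONDITION & SPEC =====
def Spec_split_top_level_line_py (line : String) (out : List String) : Prop := out = split_top_level_line_py_alt line
instance (line : String) (out : List String) : Decidable (Spec_split_top_level_line_py line out) := by unfold Spec_split_top_level_line_py; infer_instance

-- ===== CLAIM (what is proved, stated in full; the proofs are below) =====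
def Claim_equal_split_top_level_line_py : Prop := ∀ (line : String), Dom_split_top_level_line_py line → Spec_split_top_level_line_py line (split_top_level_line_py line)

-- ===== LEMMAS AND PROOFS =====

-- tokens ≡ line[start:i]: appending the next char extends the slice by one
lemma pv_slice_snoc (L : List Char) (start i : Nat) (h1 : start ≤ i) (h2 : i < L.length) :
    (L.drop start).take (i - start) ++ [L[i]] = (L.drop start).take (i + 1 - start) := by
  have hi : i + 1 - start = (i - start) + 1 := by omega
  rw [hi, List.take_succ]
  have : (L.drop start)[i - start]? = some L[i] := by
    rw [List.getElem?_drop]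
    have : start + (i - start) = i := by omega
    rw [this, List.getElem?_eq_getElem h2]
  simp [this]

lemma pv_slice_ne_nil (L : List Char) (start i : Nat) (h1 : start ≤ i) (h2 : i ≤ L.length) :
    ((L.drop start).take (i - start) ≠ []) ↔ start < i := by
  rw [← List.length_pos_iff_ne_nil]
  simp only [List.length_take, List.length_drop]
  omega

-- main invariant: with tokens = line[start:i], A's loop output and B's sliced cuts agree up to
-- the final empty-segment filter
lemma pv_main (L : List Char) : ∀ (cs : List Char) (i start : Nat) (depth : Int)
    (commands : List (List Char)),
    cs = L.drop i → start ≤ i → i ≤ L.length →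
    (pvALoop cs commands ((L.drop start).take (i - start)) depth).filter (· ≠ []) =
      (commands ++ (pvBCuts cs i depth start).map
        (fun p => PySem.Chars.strip ((L.drop p.1).take (p.2 - p.1)))).filter (· ≠ []) := by
  intro cs
  induction cs with
  | nil =>
    intro i start depth commands hcs h1 h2
    by_cases hlt : start < i
    · have hne : (L.drop start).take (i - start) ≠ [] :=
        (pv_slice_ne_nil L start i h1 h2).mpr hlt
      simp [pvALoop, pvBCuts, hne, List.filter_append]
    · have hse : start = i := by omega
      subst hse
      have hstrip : PySem.Chars.strip ([] : List Char) = [] := by decide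
      simp [pvALoop, pvBCuts, List.filter_append, hstrip]
  | cons c rest ih =>
    intro i start depth commands hcs h1 h2
    have hi : i < L.length := by
      by_contra h
      have hd : L.drop i = [] := List.drop_eq_nil_of_le (by omega)
      rw [hd] at hcs; simp at hcs
    have hLi : L[i] = c := by
      have h0 : (L.drop i)[0]? = some c := by rw [← hcs]; rfl
      rw [List.getElem?_drop] at h0
      simpa [List.getElem?_eq_getElem hi] using h0
    have hrest : rest = L.drop (i + 1) := by
      have := congrArg List.tail hcs
      simpa [List.tail_drop] using this
    have hsnoc : (L.drop start).take (i - start) ++ [c] = (L.drop start).take (i + 1 - start) := by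
      rw [← hLi]; exact pv_slice_snoc L start i h1 hi
    have hne : ((L.drop start).take (i - start) ≠ []) ↔ start < i :=
      pv_slice_ne_nil L start i h1 (by omega)
    have htz : (i + 1) - (i + 1) = 0 := by omega
    by_cases hb : c = '['
    · subst hb
      simp only [pvALoop, pvBCuts, if_pos rfl, hsnoc]
      exact ih (i+1) start (depth+1) commands hrest (by omega) (by omega)
    · by_cases hc : c = ']'
      · subst hc
        by_cases hd : depth - 1 = 0
        · have h1' := ih (i+1) (i+1) (depth-1)
            (commands ++ [PySem.Chars.strip ((L.drop start).take (i + 1 - start))]) hrest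
            (by omega) (by omega)
          rw [htz] at h1'
          simp only [List.take_zero] at h1'
          simp only [pvALoop, pvBCuts, if_neg (show ¬((']':Char) = '[') by decide),
            if_pos rfl, if_pos hd, hsnoc, if_true]
          rw [h1']
          simp [List.append_assoc]
        · simp only [pvALoop, pvBCuts, if_neg (show ¬((']':Char) = '[') by decide),
            if_pos rfl, if_neg hd, hsnoc, if_true]
          exact ih (i+1) start (depth-1) commands hrest (by omega) (by omega)
      · by_cases hs : c = ' ' ∧ depth = 0
        · by_cases hk : pvFirstNext rest ∈ pvAllKeywords ∧ (L.drop start).take (i - start) ≠ []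
          · have hklt : start < i := hne.mp hk.2
            have hkB : (c = ' ' ∧ depth = 0 ∧ start < i ∧ pvFirstNext rest ∈ pvAllKeywords) :=
              ⟨hs.1, hs.2, hklt, hk.1⟩
            have h1' := ih (i+1) (i+1) depth
              (commands ++ [PySem.Chars.strip ((L.drop start).take (i - start))]) hrest
              (by omega) (by omega)
            rw [htz] at h1'
            simp only [List.take_zero] at h1'
            simp only [pvALoop, pvBCuts, if_neg hb, if_neg hc, if_pos hs, if_pos hk, if_pos hkB]
            rw [h1']
            simp [List.append_assoc]
          · have hkB : ¬ (c = ' ' ∧ depth = 0 ∧ start < i ∧ pvFirstNext rest ∈ pvAllKeywords) := by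
              intro h
              exact hk ⟨h.2.2.2, hne.mpr h.2.2.1⟩
            simp only [pvALoop, pvBCuts, if_neg hb, if_neg hc, if_pos hs, if_neg hk, if_neg hkB,
              hsnoc]
            exact ih (i+1) start depth commands hrest (by omega) (by omega)
        · have hkB : ¬ (c = ' ' ∧ depth = 0 ∧ start < i ∧ pvFirstNext rest ∈ pvAllKeywords) := by
            intro h; exact hs ⟨h.1, h.2.1⟩
          simp only [pvALoop, pvBCuts, if_neg hb, if_neg hc, if_neg hs, if_neg hkB, hsnoc]
          exact ih (i+1) start depth commands hrest (by omega) (by omega)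

-- ===== VERDICT (by name: the statement is the Claim_ definition above) =====
theorem split_top_level_line_py_spec : Claim_equal_split_top_level_line_py := by
  intro line _
  unfold Spec_split_top_level_line_py split_top_level_line_py split_top_level_line_py_alt
  by_cases h : line = ""
  · subst h; decide
  · rw [if_neg h]
    have hmain := pv_main line.toList line.toList 0 0 0 [] (by simp) (by omega) (by omega)
    simp only [Nat.sub_zero, List.take_zero, List.nil_append] at hmain
    simp only [hmain]
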